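-- pv_equiv track=rewrite | github.com/cjerzak/asa-software | asa/inst/python/state_utils.py | _tokenize_jsonish_schema
-- ===== SOURCE A (Python) =====
-- from typing import Any, Dict, List, Optional, Tuple
--
-- def _tokenize_jsonish_schema(text: str) -> List[Tuple[str, str]]:
--     """Tokenize a JSON-ish schema string.
--
--     This is intentionally tolerant: it supports non-JSON leaf values like
--     `string|null` or `integer`, and only relies on quoted keys.
--     """
--     tokens: List[Tuple[str, str]] = []
--     if not text:
--         return tokens
--
--     i = 0
--     n = len(text)
--     punct = set("{}[]:,")
--
--     while i < n:
--         ch = text[i]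
--
--         if ch.isspace():
--             i += 1
--             continue
--
--         if ch in punct:
--             tokens.append((ch, ch))
--             i += 1
--             continue
--
--         if ch == '"':
--             # Parse double-quoted string literal; keep the decoded content only.
--             i += 1
--             buf: List[str] = []
--             escape_next = False
--             while i < n:
--                 c = text[i]
--                 if escape_next:
--                     buf.append(c)
--                     escape_next = False
--                     i += 1
--                     continue
--                 if c == "\\":
--                     escape_next = True
--                     i += 1
--                     continue
--                 if c == '"':
--                     break
--                 buf.append(c)
--                 i += 1
--             tokens.append(("STRING", "".join(buf)))
--             if i < n and text[i] == '"':
--                 i += 1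
--             continue
--
--         # OTHER token: read until whitespace or punctuation or string start.
--         start = i
--         while i < n and (not text[i].isspace()) and (text[i] not in punct) and (text[i] != '"'):
--             i += 1
--         tokens.append(("OTHER", text[start:i]))
--
--     return tokens
-- ===== SOURCE B (Python) =====
-- # One-pass DFA tokenizer: a single fold over the characters with an explicit
-- # mode (normal / in-string / escape) and a pending buffer, instead of nested
-- # index-advancing while loops.
-- def _tokenize_jsonish_schema(text):
--     punct = "{}[]:,"
--     tokens = []
--     mode = 0  # 0 = normal, 1 = inside string, 2 = after backslash
--     buf = []
--     for c in text:
--         if mode == 2: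
--             buf.append(c)
--             mode = 1
--         elif mode == 1:
--             if c == "\\":
--                 mode = 2
--             elif c == '"':
--                 tokens.append(("STRING", "".join(buf)))
--                 buf = []
--                 mode = 0
--             else:
--                 buf.append(c)
--         else:
--             if c.isspace() or c in punct or c == '"':
--                 if buf:
--                     tokens.append(("OTHER", "".join(buf)))
--                     buf = []
--                 if c in punct:
--                     tokens.append((c, c))
--                 elif c == '"':
--                     mode = 1
--             else:
--                 buf.append(c)
--     if mode != 0:
--         tokens.append(("STRING", "".join(buf)))
--     elif buf:
--         tokens.append(("OTHER", "".join(buf)))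
--     return tokens
-- ===== Notes on version B (the rewrite author's own statement) =====
-- stated objective: alternative
-- what changed: Replaces A's nested index-advancing while loops (separate inner loops for quoted strings and OTHER runs) with a single one-pass three-mode DFA (normal / in-string / escape) folding over the characters with a pending buffer.
import Mathlib
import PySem

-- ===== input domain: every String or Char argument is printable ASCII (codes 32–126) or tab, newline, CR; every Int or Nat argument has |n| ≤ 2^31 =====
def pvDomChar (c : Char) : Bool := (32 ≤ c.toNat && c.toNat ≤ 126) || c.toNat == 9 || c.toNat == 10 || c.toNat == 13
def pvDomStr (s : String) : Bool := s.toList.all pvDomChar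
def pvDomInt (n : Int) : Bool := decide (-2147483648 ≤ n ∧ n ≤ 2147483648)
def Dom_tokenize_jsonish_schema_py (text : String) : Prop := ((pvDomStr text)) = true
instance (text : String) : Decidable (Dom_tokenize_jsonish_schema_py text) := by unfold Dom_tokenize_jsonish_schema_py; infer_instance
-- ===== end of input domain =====

-- B replaces A's nested index-advancing while loops by a single one-pass
-- three-mode DFA fold over the characters (objective: alternative decomposition).

-- ===== PORT A =====
-- A's loop index i is represented by the remaining suffix of the character list;
-- each iteration of A's while loops consumes the characters it advances over.

def pvPunct : List Char := ['{', '}', '[', ']', ':', ',']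

-- A's inner quoted-string while loop: returns (buf, remainder after the closing quote).
def pvParseStr : List Char → Bool → (List Char × List Char)
  | [], _ => ([], [])
  | c :: rest, true =>
      let (b, r) := pvParseStr rest false
      (c :: b, r)
  | c :: rest, false =>
      if c = '\\' then pvParseStr rest true
      else if c = '"' then ([], rest)
      else
        let (b, r) := pvParseStr rest false
        (c :: b, r)

-- A's inner OTHER while loop: read until whitespace / punctuation / '"'.
def pvSpanOther : List Char → (List Char × List Char)
  | [] => ([], [])
  | c :: rest =>
      if PySem.Chars.isspace c ∨ c ∈ pvPunct ∨ c = '"' then ([], c :: rest)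
      else
        let (w, r) := pvSpanOther rest
        (c :: w, r)

theorem pvParseStr_len (l : List Char) (e : Bool) : (pvParseStr l e).2.length ≤ l.length := by
  induction l generalizing e with
  | nil => simp [pvParseStr]
  | cons c rest ih =>
    cases e with
    | true => have := ih false; simp only [pvParseStr]; simp at *; omega
    | false =>
      simp only [pvParseStr]
      split_ifs with h1 h2
      · have := ih true; simp at *; omega
      · simp
      · have := ih false; simp at *; omega

theorem pvSpanOther_len (l : List Char) : (pvSpanOther l).2.length ≤ l.length := by
  induction l with
  | nil => simp [pvSpanOther]
  | cons c rest ih =>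
    simp only [pvSpanOther]
    split_ifs with h
    · simp
    · simp; omega

def pvTokA : List Char → List (String × String)
  | [] => []
  | c :: rest =>
    if PySem.Chars.isspace c then pvTokA rest
    else if c ∈ pvPunct then (String.mk [c], String.mk [c]) :: pvTokA rest
    else if c = '"' then
      let p := pvParseStr rest false
      ("STRING", String.mk p.1) :: pvTokA p.2
    else
      let p := pvSpanOther rest
      ("OTHER", String.mk (c :: p.1)) :: pvTokA p.2
  termination_by l => l.length
  decreasing_by
    · simp
    · simp
    · have := pvParseStr_len rest false; simp; omega
    · have := pvSpanOther_len rest; simp; omega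

def tokenize_jsonish_schema_py (text : String) : List (String × String) :=
  pvTokA text.toList

-- ===== PORT B =====
-- B: one fold over the characters, state = (tokens so far, mode 0/1/2, pending buffer).

def pvStepB (st : List (String × String) × Nat × List Char) (c : Char) :
    List (String × String) × Nat × List Char :=
  let (toks, mode, buf) := st
  if mode = 2 then (toks, 1, buf ++ [c])
  else if mode = 1 then
    if c = '\\' then (toks, 2, buf)
    else if c = '"' then (toks ++ [("STRING", String.mk buf)], 0, [])
    else (toks, 1, buf ++ [c])
  else
    if PySem.Chars.isspace c ∨ c ∈ pvPunct ∨ c = '"' then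
      let toks' := if buf ≠ [] then toks ++ [("OTHER", String.mk buf)] else toks
      if c ∈ pvPunct then (toks' ++ [(String.mk [c], String.mk [c])], 0, [])
      else if c = '"' then (toks', 1, [])
      else (toks', 0, [])
    else (toks, 0, buf ++ [c])

def pvFinB (st : List (String × String) × Nat × List Char) : List (String × String) :=
  let (toks, mode, buf) := st
  if mode ≠ 0 then toks ++ [("STRING", String.mk buf)]
  else if buf ≠ [] then toks ++ [("OTHER", String.mk buf)]
  else toks

def tokenize_jsonish_schema_py_alt (text : String) : List (String × String) :=
  pvFinB (text.toList.foldl pvStepB ([], 0, []))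

-- ===== PRECONDITION & SPEC =====
def Spec_tokenize_jsonish_schema_py (text : String) (out : List (String × String)) : Prop := out = tokenize_jsonish_schema_py_alt text
instance (text : String) (out : List (String × String)) : Decidable (Spec_tokenize_jsonish_schema_py text out) := by unfold Spec_tokenize_jsonish_schema_py; infer_instance

-- ===== CLAIM (what is proved, stated in full; the proofs are below) =====
def Claim_equal_tokenize_jsonish_schema_py : Prop := ∀ (text : String), Dom_tokenize_jsonish_schema_py text → Spec_tokenize_jsonish_schema_py text (tokenize_jsonish_schema_py text)

-- ===== LEMMAS AND PROOFS =====

-- A whitespace character is neither punctuation nor a double quote.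
theorem pvIsspace_excl (c : Char) (h : PySem.Chars.isspace c = true) :
    c ∉ pvPunct ∧ c ≠ '"' := by
  simp [PySem.Chars.isspace] at h
  constructor
  · intro hc
    simp [pvPunct] at hc
    rcases hc with rfl|rfl|rfl|rfl|rfl|rfl <;> simp at h
  · rintro rfl
    simp at h

-- Inside a string (mode 1, or mode 2 after a backslash) the DFA run over l is,
-- up to finalization, the run over the remainder of A's string parse with the
-- STRING token emitted.
theorem pvStrRun (l : List Char) (e : Bool) (buf : List Char) (toks : List (String × String)) :
    pvFinB (l.foldl pvStepB (toks, (if e then 2 else 1), buf)) =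
      pvFinB ((pvParseStr l e).2.foldl pvStepB
        (toks ++ [("STRING", String.mk (buf ++ (pvParseStr l e).1))], 0, [])) := by
  induction l generalizing e buf with
  | nil => cases e <;> simp [pvParseStr, pvFinB]
  | cons c rest ih =>
    cases e with
    | true =>
      have h := ih false (buf ++ [c])
      simp only [pvParseStr, List.foldl_cons, pvStepB] at *
      simp at h
      simpa using h
    | false =>
      by_cases hb : c = '\\'
      · have h := ih true buf
        simp at h
        simp only [pvParseStr, List.foldl_cons, pvStepB, if_pos hb]
        simpa [hb] using h
      · by_cases hq : c = '"'
        · simp [pvParseStr, pvStepB, hq]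
        · have h := ih false (buf ++ [c])
          simp only [pvParseStr, List.foldl_cons, pvStepB] at *
          simp [hb, hq] at *
          simpa using h

-- In normal mode with a nonempty pending buffer, the DFA run over l is, up to
-- finalization, the run over the remainder of A's OTHER span with the OTHER
-- token emitted.
theorem pvWordRun (l : List Char) (buf : List Char) (hb : buf ≠ []) (toks : List (String × String)) :
    pvFinB (l.foldl pvStepB (toks, 0, buf)) =
      pvFinB ((pvSpanOther l).2.foldl pvStepB
        (toks ++ [("OTHER", String.mk (buf ++ (pvSpanOther l).1))], 0, [])) := by
  induction l generalizing buf with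
  | nil => simp [pvSpanOther, pvFinB, hb]
  | cons c rest ih =>
    by_cases hstop : PySem.Chars.isspace c ∨ c ∈ pvPunct ∨ c = '"'
    · simp only [pvSpanOther, if_pos hstop, List.foldl_cons]
      have hstep : pvStepB (toks, 0, buf) c =
          pvStepB (toks ++ [("OTHER", String.mk buf)], 0, ([] : List Char)) c := by
        simp [pvStepB, hstop, hb]
      rw [hstep]
      simp
    · have h := ih (buf ++ [c]) (by simp)
      simp only [pvSpanOther, if_neg hstop, List.foldl_cons, pvStepB] at *
      simp [hstop] at *
      simpa using h

-- Main invariant: from a clean normal state, finalizing the DFA run over l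
-- appends exactly A's token list for l.
theorem pvMain (l : List Char) (toks : List (String × String)) :
    pvFinB (l.foldl pvStepB (toks, 0, [])) = toks ++ pvTokA l := by
  induction hn : l.length using Nat.strong_induction_on generalizing l toks with
  | _ n ih =>
  cases l with
  | nil => simp [pvTokA, pvFinB]
  | cons c rest =>
    subst hn
    by_cases hs : PySem.Chars.isspace c
    · rw [pvTokA]
      simp only [List.foldl_cons]
      have : pvStepB (toks, 0, ([] : List Char)) c = (toks, 0, []) := by
        simp [pvStepB, hs, (pvIsspace_excl c hs).1, (pvIsspace_excl c hs).2]
      rw [this, if_pos hs, ih rest.length (by simp) rest toks rfl]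
    · by_cases hp : c ∈ pvPunct
      · rw [pvTokA]
        simp only [List.foldl_cons]
        have : pvStepB (toks, 0, ([] : List Char)) c =
            (toks ++ [(String.mk [c], String.mk [c])], 0, []) := by
          simp [pvStepB, hp]
        rw [this, if_neg hs, if_pos hp,
          ih rest.length (by simp) rest _ rfl, List.append_assoc]
        rfl
      · by_cases hq : c = '"'
        · rw [pvTokA]
          simp only [List.foldl_cons]
          have : pvStepB (toks, 0, ([] : List Char)) c = (toks, 1, []) := by
            simp [pvStepB, hq, pvPunct]
          rw [this]
          have h1 := pvStrRun rest false [] toks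
          simp only [if_neg (by simp : ¬ (false : Bool) = true), List.nil_append] at h1
          rw [h1, ih (pvParseStr rest false).2.length
            (by have := pvParseStr_len rest false; simp; omega) _ _ rfl,
            if_neg hs, if_neg hp, if_pos hq, List.append_assoc]
          rfl
        · rw [pvTokA]
          simp only [List.foldl_cons]
          have : pvStepB (toks, 0, ([] : List Char)) c = (toks, 0, [c]) := by
            simp [pvStepB, hs, hp, hq]
          rw [this]
          have h1 := pvWordRun rest [c] (by simp) toks
          simp only [List.cons_append, List.nil_append] at h1
          rw [h1, ih (pvSpanOther rest).2.length
            (by have := pvSpanOther_len rest; simp; omega) _ _ rfl,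
            if_neg hs, if_neg hp, if_neg hq, List.append_assoc]
          rfl

-- ===== VERDICT (by name: the statement is the Claim_ definition above) =====
theorem tokenize_jsonish_schema_py_spec : Claim_equal_tokenize_jsonish_schema_py := by
  intro text _
  show tokenize_jsonish_schema_py text = tokenize_jsonish_schema_py_alt text
  unfold tokenize_jsonish_schema_py tokenize_jsonish_schema_py_alt
  rw [pvMain]
  simp
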